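-- pv_equiv track=rewrite | github.com/vedang-kamat/line-coding-schemes | line_coding.py | biphasem_encode
-- ===== SOURCE A (Python) =====
-- def biphasem_encode(bits):
--     """Biphase-M: transition at start; extra transition for 1"""
--     encoded, prev = [], 0
--     for b in bits:
--         prev = 0 if prev == 1 else 1
--         encoded.append(prev)
--         if b == 1:
--             prev = 0 if prev == 1 else 1
--         encoded.append(prev)
--     return encoded
-- ===== SOURCE B (Python) =====
-- def biphasem_encode(bits):
--     """Biphase-M via transition table + prefix-XOR scan."""
--     flags = []
--     for b in bits:
--         flags.append(1)
--         flags.append(1 if b == 1 else 0)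
--     out, level = [], 0
--     for f in flags:
--         level ^= f
--         out.append(level)
--     return out
-- ===== Notes on version B (the rewrite author's own statement) =====
-- stated objective: alternative
-- what changed: Replaces the toggling state machine with a flattened per-bit transition table (mandatory 1 plus optional mid-bit flag) followed by a running-XOR prefix scan over the flags.
import Mathlib
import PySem

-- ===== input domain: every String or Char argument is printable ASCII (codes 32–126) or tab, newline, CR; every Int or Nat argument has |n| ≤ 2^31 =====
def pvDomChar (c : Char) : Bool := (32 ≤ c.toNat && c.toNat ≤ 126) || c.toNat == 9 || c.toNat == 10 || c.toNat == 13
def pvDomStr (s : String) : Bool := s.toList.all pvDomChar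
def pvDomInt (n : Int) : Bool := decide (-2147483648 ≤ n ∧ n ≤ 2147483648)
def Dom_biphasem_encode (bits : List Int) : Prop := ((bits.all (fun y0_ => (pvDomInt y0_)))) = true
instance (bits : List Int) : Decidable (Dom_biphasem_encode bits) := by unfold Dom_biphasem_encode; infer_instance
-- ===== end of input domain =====

-- B is the same task by a different decomposition (transition table + prefix-XOR scan); no speed claim.

-- ===== PORT A =====
-- toggling state machine: per bit, toggle prev (start transition), append, optionally toggle again on b == 1, append
def biphasem_encode (bits : List Int) : List Int :=
  (bits.foldl (fun (st : List Int × Int) b =>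
      let prev := if st.2 = 1 then 0 else 1
      let encoded := st.1 ++ [prev]
      let prev := if b = 1 then (if prev = 1 then 0 else 1) else prev
      (encoded ++ [prev], prev)) ([], 0)).1

-- ===== PORT B =====
-- first loop of Source B: build the flag list, two flags per bit
def bpmFlags (bits : List Int) : List Int :=
  bits.foldl (fun flags b => (flags ++ [1]) ++ [if b = 1 then 1 else 0]) []

-- second loop of Source B: running XOR over the flags
def biphasem_encode_alt (bits : List Int) : List Int :=
  ((bpmFlags bits).foldl (fun (st : List Int × Int) f =>
      let level := PySem.Int.bxor st.2 f
      (st.1 ++ [level], level)) ([], 0)).1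

-- ===== PRECONDITION & SPEC =====
def Spec_biphasem_encode (bits : List Int) (out : List Int) : Prop := out = biphasem_encode_alt bits
instance (bits : List Int) (out : List Int) : Decidable (Spec_biphasem_encode bits out) := by unfold Spec_biphasem_encode; infer_instance

-- ===== CLAIM (what is proved, stated in full; the proofs are below) =====
def Claim_equal_biphasem_encode : Prop := ∀ (bits : List Int), Dom_biphasem_encode bits → Spec_biphasem_encode bits (biphasem_encode bits)

-- ===== LEMMAS AND PROOFS =====

-- the flag-building foldl peels an accumulator prefix
lemma bpmFlagsAux (bits : List Int) (acc : List Int) :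
    bits.foldl (fun flags b => (flags ++ [1]) ++ [if b = 1 then 1 else 0]) acc
      = acc ++ bits.foldl (fun flags b => (flags ++ [1]) ++ [if b = 1 then 1 else 0]) [] := by
  induction bits generalizing acc with
  | nil => simp
  | cons b rest ih =>
    simp only [List.foldl_cons]
    rw [ih, ih ([] ++ [1] ++ _)]
    simp

-- main invariant: from any matching state (same accumulated output, A's prev = B's level ∈ {0,1})
-- the two folds produce the same output list
lemma bpm_main (bits : List Int) (acc : List Int) (p : Int) (hp : p = 0 ∨ p = 1) :
    (bits.foldl (fun (st : List Int × Int) b =>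
        let prev := if st.2 = 1 then 0 else 1
        let encoded := st.1 ++ [prev]
        let prev := if b = 1 then (if prev = 1 then 0 else 1) else prev
        (encoded ++ [prev], prev)) (acc, p)).1
      = ((bits.foldl (fun flags b => (flags ++ [1]) ++ [if b = 1 then 1 else 0]) []).foldl
          (fun (st : List Int × Int) f =>
            let level := PySem.Int.bxor st.2 f
            (st.1 ++ [level], level)) (acc, p)).1 := by
  induction bits generalizing acc p with
  | nil => simp
  | cons b rest ih =>
    have hx01 : PySem.Int.bxor 0 1 = (1:Int) := by decide
    have hx11 : PySem.Int.bxor 1 1 = (0:Int) := by decide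
    have hx00 : PySem.Int.bxor 0 0 = (0:Int) := by decide
    have hx10 : PySem.Int.bxor 1 0 = (1:Int) := by decide
    simp only [List.foldl_cons]
    rw [bpmFlagsAux rest ([] ++ [1] ++ [if b = 1 then 1 else 0]), List.foldl_append]
    simp only [List.nil_append, List.foldl_cons, List.foldl_nil]
    rcases hp with hp | hp <;> subst hp <;> by_cases hb : b = 1
    · simpa [hb, hx01, hx11] using ih (acc ++ [1, 0]) 0 (Or.inl rfl)
    · simpa [hb, hx01, hx00] using ih (acc ++ [1, 1]) 1 (Or.inr rfl)
    · simpa [hb, hx11, hx01] using ih (acc ++ [0, 1]) 1 (Or.inr rfl)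
    · simpa [hb, hx11, hx10] using ih (acc ++ [0, 0]) 0 (Or.inl rfl)

-- ===== VERDICT (by name: the statement is the Claim_ definition above) =====
theorem biphasem_encode_spec : Claim_equal_biphasem_encode := by
  intro bits _
  unfold Spec_biphasem_encode biphasem_encode biphasem_encode_alt bpmFlags
  exact bpm_main bits [] 0 (Or.inl rfl)
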